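-- pv_equiv track=rewrite | github.com/david-seu/Projects-UBB | LogicOptionalHomework/functions/functions.py | convert_number_from_base_10_to_base_different_from_16
-- ===== SOURCE A (Python) =====
-- def convert_number_from_base_10_to_base_different_from_16(number, destination_base):
--     converted_number = 0
--     power = 0
--     while number != 0:
--         converted_number += (number % destination_base) * (10 ** power)
--         power += 1
--         number //= destination_base
--     return converted_number
-- ===== SOURCE B (Python) =====
-- def convert_number_from_base_10_to_base_different_from_16(number, destination_base):
--     digits = []
--     while number != 0:
--         digits.append(number % destination_base)
--         number //= destination_base
--     result = 0
--     for d in reversed(digits):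
--         result = result * 10 + d
--     return result
-- ===== Notes on version B (the rewrite author's own statement) =====
-- stated objective: alternative
-- what changed: Replaces A's single-pass accumulation with 10**power scaling by a two-phase decomposition: first collect the base-b remainders into a list, then reassemble the decimal-encoded result most-significant-first with Horner's rule (result*10+d), eliminating the power counter and exponentiation.
import Mathlib
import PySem

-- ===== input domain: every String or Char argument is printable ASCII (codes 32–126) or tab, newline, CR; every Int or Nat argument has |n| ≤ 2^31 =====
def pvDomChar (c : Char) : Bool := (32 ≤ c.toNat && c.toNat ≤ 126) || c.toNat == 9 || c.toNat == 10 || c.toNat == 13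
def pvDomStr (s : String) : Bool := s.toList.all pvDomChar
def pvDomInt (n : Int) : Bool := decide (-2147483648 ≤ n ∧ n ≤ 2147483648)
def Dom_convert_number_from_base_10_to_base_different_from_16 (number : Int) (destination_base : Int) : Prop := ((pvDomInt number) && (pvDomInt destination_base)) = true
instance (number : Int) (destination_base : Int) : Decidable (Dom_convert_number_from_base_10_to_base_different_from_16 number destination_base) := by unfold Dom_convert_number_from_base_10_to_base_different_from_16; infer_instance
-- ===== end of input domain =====

-- B replaces A's 10**power accumulation by collecting the remainder digits and
-- reassembling them with Horner's rule; same value, no exponentiation ("alternative").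
-- Both loops are guarded by fuel, which only makes them total: on every input
-- admitted by Pre_ (and Dom_) the Python loops run at most 33 iterations.

-- ===== PORT A =====
-- the while loop of A: state (number, converted_number, power)
def pvLoopA (fuel : Nat) (number : Int) (destination_base : Int)
    (converted_number : Int) (power : Nat) : Int :=
  match fuel with
  | 0 => converted_number
  | fuel + 1 =>
    if number = 0 then converted_number
    else pvLoopA fuel (PySem.Int.floordiv number destination_base) destination_base
      (converted_number + (PySem.Int.mod number destination_base) * 10 ^ power) (power + 1)

def convert_number_from_base_10_to_base_different_from_16 (number : Int) (destination_base : Int) : Int :=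
  pvLoopA 128 number destination_base 0 0

-- ===== PORT B =====
-- phase 1 of B: collect the remainders (least significant first)
def pvDigits (fuel : Nat) (number : Int) (destination_base : Int) : List Int :=
  match fuel with
  | 0 => []
  | fuel + 1 =>
    if number = 0 then []
    else PySem.Int.mod number destination_base ::
      pvDigits fuel (PySem.Int.floordiv number destination_base) destination_base

def convert_number_from_base_10_to_base_different_from_16_alt (number : Int) (destination_base : Int) : Int :=
  -- phase 2 of B: Horner's rule over the reversed digit list
  (pvDigits 128 number destination_base).reverse.foldl (fun r d => r * 10 + d) 0

-- ===== PRECONDITION & SPEC =====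
-- Pre_ excludes exactly the inputs where Python A does not return: base 0 with a
-- nonzero number raises ZeroDivisionError, and the loop never terminates for a
-- nonzero number with base 1, -1, or with base >= 2 and a negative number.
def Pre_convert_number_from_base_10_to_base_different_from_16 (number : Int) (destination_base : Int) : Prop :=
  number = 0 ∨ (0 ≤ number ∧ 2 ≤ destination_base) ∨ destination_base ≤ -2
instance (number : Int) (destination_base : Int) : Decidable (Pre_convert_number_from_base_10_to_base_different_from_16 number destination_base) := by unfold Pre_convert_number_from_base_10_to_base_different_from_16; infer_instance
def pvWitness_convert_number_from_base_10_to_base_different_from_16 : Int × Int := (10, 2)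

def Spec_convert_number_from_base_10_to_base_different_from_16 (number : Int) (destination_base : Int) (out : Int) : Prop := out = convert_number_from_base_10_to_base_different_from_16_alt number destination_base
instance (number : Int) (destination_base : Int) (out : Int) : Decidable (Spec_convert_number_from_base_10_to_base_different_from_16 number destination_base out) := by unfold Spec_convert_number_from_base_10_to_base_different_from_16; infer_instance

-- ===== CLAIM (what is proved, stated in full; the proofs are below) =====
def Claim_equal_convert_number_from_base_10_to_base_different_from_16 : Prop := ∀ (number : Int) (destination_base : Int), Dom_convert_number_from_base_10_to_base_different_from_16 number destination_base → Pre_convert_number_from_base_10_to_base_different_from_16 number destination_base → Spec_convert_number_from_base_10_to_base_different_from_16 number destination_base (convert_number_from_base_10_to_base_different_from_16 number destination_base)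

-- ===== LEMMAS AND PROOFS =====

-- Horner's fold over the reversed digit list, in recursive form
theorem pv_horner_cons (d : Int) (ds : List Int) :
    (d :: ds).reverse.foldl (fun r d => r * 10 + d) 0 =
      d + 10 * (ds.reverse.foldl (fun r d => r * 10 + d) 0) := by
  simp [List.foldl_append]; ring

-- the invariant linking A's accumulating loop to B's digit list
theorem pv_loopA_eq (fuel : Nat) (n b acc : Int) (pow : Nat) :
    pvLoopA fuel n b acc pow =
      acc + 10 ^ pow * ((pvDigits fuel n b).reverse.foldl (fun r d => r * 10 + d) 0) := by
  induction fuel generalizing n acc pow with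
  | zero => simp [pvLoopA, pvDigits]
  | succ f ih =>
    simp only [pvLoopA, pvDigits]
    by_cases h : n = 0
    · simp [h]
    · simp only [h, ite_false]
      rw [ih, pv_horner_cons]
      ring

-- ===== VERDICT (by name: the statement is the Claim_ definition above) =====
theorem convert_number_from_base_10_to_base_different_from_16_spec : Claim_equal_convert_number_from_base_10_to_base_different_from_16 := by
  intro number destination_base _ _
  unfold Spec_convert_number_from_base_10_to_base_different_from_16
  unfold convert_number_from_base_10_to_base_different_from_16
  unfold convert_number_from_base_10_to_base_different_from_16_alt
  rw [pv_loopA_eq]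
  ring
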